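-- pv_equiv track=rewrite | github.com/Ktano/FP2Pi | todas as funções.py | linha_completa
-- ===== SOURCE A (Python) =====
-- def linha_completa(esp,linha):
--     n=0
--     t=()
--     for i in linha:
--         if i == 2:
--             n+=1
--         elif i==1:
--             if n>0:
--                 t=t+(n,)
--             n=0
--         else:
--             return False
--     if n>0:
--         t=t+(n,)
--     return esp==t
-- ===== SOURCE B (Python) =====
-- def linha_completa(esp, linha):
--     s = ''.join('2' if i == 2 else '1' if i == 1 else '?' for i in linha)
--     if '?' in s:
--         return False
--     return esp == tuple(len(p) for p in s.split('1') if p)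
-- ===== Notes on version B (the rewrite author's own statement) =====
-- stated objective: idiomatic
-- what changed: B tokenizes the row into a string and gets the run lengths by splitting on '1' and measuring the nonempty parts, instead of A's single scan with a manual run counter and tuple accumulator.
import Mathlib
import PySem

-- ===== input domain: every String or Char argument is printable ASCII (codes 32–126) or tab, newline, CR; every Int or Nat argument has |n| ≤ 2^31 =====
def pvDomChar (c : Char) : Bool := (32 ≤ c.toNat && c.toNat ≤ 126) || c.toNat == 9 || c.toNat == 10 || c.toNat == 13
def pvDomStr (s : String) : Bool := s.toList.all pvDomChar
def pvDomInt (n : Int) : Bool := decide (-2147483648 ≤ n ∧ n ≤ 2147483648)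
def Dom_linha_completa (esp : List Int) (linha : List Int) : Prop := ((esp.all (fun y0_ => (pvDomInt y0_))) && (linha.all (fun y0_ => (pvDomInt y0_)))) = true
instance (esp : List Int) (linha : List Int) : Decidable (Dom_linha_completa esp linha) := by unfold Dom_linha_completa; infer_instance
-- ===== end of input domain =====

-- B replaces A's manual run counter with string tokenization and split-on-'1'; objective: idiomatic, same O(n) cost.

-- ===== PORT A =====
-- A's for-loop with the early `return False`: state (n, t), element by element
def lcGo (esp : List Int) (n : Int) (t : List Int) : List Int → Bool
  | [] => if n > 0 then esp == t ++ [n] else esp == t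
  | i :: rest =>
      if i == 2 then lcGo esp (n + 1) t rest
      else if i == 1 then
        (if n > 0 then lcGo esp 0 (t ++ [n]) rest else lcGo esp 0 t rest)
      else false

def linha_completa (esp : List Int) (linha : List Int) : Bool :=
  lcGo esp 0 [] linha

-- ===== PORT B =====
-- Source B: map each cell to a char ('2'/'1'/'?'), reject on '?', split on '1',
-- keep the nonempty parts, compare their lengths with esp
def linha_completa_alt (esp : List Int) (linha : List Int) : Bool :=
  let s : List Char := linha.map (fun i => if i == 2 then '2' else if i == 1 then '1' else '?')
  if s.contains '?' then false
  else esp == ((s.splitOn '1').filter (fun p => !p.isEmpty)).map (fun p => (p.length : Int))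

-- ===== PRECONDITION & SPEC =====
def Spec_linha_completa (esp : List Int) (linha : List Int) (out : Bool) : Prop := out = linha_completa_alt esp linha
instance (esp : List Int) (linha : List Int) (out : Bool) : Decidable (Spec_linha_completa esp linha out) := by unfold Spec_linha_completa; infer_instance

-- ===== CLAIM (what is proved, stated in full; the proofs are below) =====
def Claim_equal_linha_completa : Prop := ∀ (esp : List Int) (linha : List Int), Dom_linha_completa esp linha → Spec_linha_completa esp linha (linha_completa esp linha)

-- ===== LEMMAS AND PROOFS =====

-- reference run-length list, with a pending run of length m
def lcRuns : Nat → List Int → List Int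
  | m, [] => if 0 < m then [(m : Int)] else []
  | m, i :: rest =>
      if i = 2 then lcRuns (m + 1) rest
      else (if 0 < m then [(m : Int)] else []) ++ lcRuns 0 rest

def lcChar (i : Int) : Char := if i == 2 then '2' else if i == 1 then '1' else '?'

def lcLens (s : List Char) : List Int :=
  ((s.splitOn '1').filter (fun p => !p.isEmpty)).map (fun p => (p.length : Int))

theorem lcGo_good (linha : List Int) (hg : ∀ i ∈ linha, i = 1 ∨ i = 2) :
    ∀ (m : Nat) (esp t : List Int), lcGo esp (↑m) t linha = (esp == t ++ lcRuns m linha) := by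
  induction linha with
  | nil =>
      intro m esp t
      cases m with
      | zero => simp [lcGo, lcRuns]
      | succ k => simp [lcGo, lcRuns]
  | cons i rest ih =>
      intro m esp t
      have hrest : ∀ j ∈ rest, j = 1 ∨ j = 2 := fun j hj => hg j (List.mem_cons_of_mem _ hj)
      have ih0 : ∀ esp t, lcGo esp 0 t rest = (esp == t ++ lcRuns 0 rest) := by
        intro a b; simpa using ih hrest 0 a b
      rcases hg i List.mem_cons_self with rfl | rfl
      · cases m with
        | zero => simp [lcGo, lcRuns, ih0]
        | succ k => simp [lcGo, lcRuns, ih0, List.append_assoc]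
      · have ihS : lcGo esp (↑m + 1) t rest = (esp == t ++ lcRuns (m + 1) rest) := by
          have := ih hrest (m + 1) esp t
          rwa [Nat.cast_add, Nat.cast_one] at this
        simp [lcGo, lcRuns, ihS]

theorem lcGo_bad (linha : List Int) :
    ∀ (n : Int) (esp t : List Int), (∃ i ∈ linha, i ≠ 1 ∧ i ≠ 2) → lcGo esp n t linha = false := by
  induction linha with
  | nil => simp
  | cons i rest ih =>
      rintro n esp t ⟨j, hj, hj1, hj2⟩
      rcases List.mem_cons.1 hj with rfl | hjr
      · simp [lcGo, beq_iff_eq, hj1, hj2]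
      · by_cases h2 : i = 2
        · subst h2; simpa [lcGo] using ih (n + 1) esp t ⟨j, hjr, hj1, hj2⟩
        · by_cases h1 : i = 1
          · subst h1
            by_cases hn : n > 0 <;>
              · simp only [lcGo, beq_iff_eq, hn]
                norm_num
                exact ih 0 esp _ ⟨j, hjr, hj1, hj2⟩
          · simp [lcGo, beq_iff_eq, h1, h2]

theorem lcReplAppend (m : Nat) (x : Char) (l : List Char) :
    List.replicate m x ++ x :: l = List.replicate (m + 1) x ++ l := by
  induction m with
  | zero => simp
  | succ k ih => simpa [List.replicate_succ] using ih

theorem lcLens_good (linha : List Int) (hg : ∀ i ∈ linha, i = 1 ∨ i = 2) :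
    ∀ (m : Nat), lcLens (List.replicate m '2' ++ linha.map lcChar) = lcRuns m linha := by
  induction linha with
  | nil =>
      intro m
      have hs : (List.replicate m '2').splitOn '1' = [List.replicate m '2'] := by
        unfold List.splitOn
        exact List.splitOnP_eq_single _ _ (fun x hx => by
          have := List.eq_of_mem_replicate hx; subst this; decide)
      cases m with
      | zero =>
          unfold lcLens; simp only [List.map_nil, List.append_nil]
          rw [hs]; simp [lcRuns]
      | succ k =>
          unfold lcLens; simp only [List.map_nil, List.append_nil]
          rw [hs]; simp [lcRuns, List.replicate_succ]
  | cons i rest ih =>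
      intro m
      have hrest : ∀ j ∈ rest, j = 1 ∨ j = 2 := fun j hj => hg j (List.mem_cons_of_mem _ hj)
      have ih0 : lcLens (rest.map lcChar) = lcRuns 0 rest := by simpa using ih hrest 0
      rcases hg i List.mem_cons_self with rfl | rfl
      · have hmap : List.map lcChar ((1 : Int) :: rest) = '1' :: rest.map lcChar := by
          simp [lcChar]
        have hsplit : (List.replicate m '2' ++ '1' :: rest.map lcChar).splitOn '1'
            = List.replicate m '2' :: (rest.map lcChar).splitOn '1' := by
          unfold List.splitOn
          exact List.splitOnP_first _ _ (fun x hx => by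
            have := List.eq_of_mem_replicate hx; subst this; decide) _ (by decide) _
        unfold lcLens
        rw [hmap, hsplit]
        cases m with
        | zero =>
            unfold lcLens at ih0
            simpa [lcRuns, List.filter_cons] using ih0
        | succ k =>
            have hRuns : lcRuns (k + 1) ((1 : Int) :: rest)
                = (((k + 1 : Nat)) : Int) :: lcRuns 0 rest := by
              norm_num [lcRuns]
            rw [hRuns, List.filter_cons]
            have hne : (!(List.replicate (k + 1) '2').isEmpty) = true := by
              simp [List.replicate_succ]
            rw [if_pos hne]
            unfold lcLens at ih0
            simp [ih0]
      · have hs : List.replicate m '2' ++ List.map lcChar ((2 : Int) :: rest)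
            = List.replicate (m + 1) '2' ++ rest.map lcChar := by
          rw [show List.map lcChar ((2 : Int) :: rest) = '2' :: rest.map lcChar by simp [lcChar]]
          exact lcReplAppend m '2' _
        rw [hs, ih hrest (m + 1)]
        simp [lcRuns]

theorem lcMap_bad (linha : List Int) (hb : ∃ i ∈ linha, i ≠ 1 ∧ i ≠ 2) :
    (linha.map lcChar).contains '?' = true := by
  obtain ⟨i, hi, h1, h2⟩ := hb
  have hch : lcChar i = '?' := by
    simp only [lcChar, beq_iff_eq]
    rw [if_neg h2, if_neg h1]
  simp only [List.contains_eq_mem, decide_eq_true_eq, List.mem_map]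
  exact ⟨i, hi, hch⟩

theorem lcMap_good (linha : List Int) (hg : ∀ i ∈ linha, i = 1 ∨ i = 2) :
    (linha.map lcChar).contains '?' = false := by
  simp only [List.contains_eq_mem, decide_eq_false_iff_not, List.mem_map, not_exists]
  rintro i ⟨hi, hch⟩
  rcases hg i hi with rfl | rfl <;> simp [lcChar] at hch

-- ===== VERDICT (by name: the statement is the Claim_ definition above) =====
theorem linha_completa_spec : Claim_equal_linha_completa := by
  intro esp linha _
  show linha_completa esp linha = linha_completa_alt esp linha
  have hmap : (linha.map (fun i => if i == 2 then '2' else if i == 1 then '1' else '?'))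
      = linha.map lcChar := rfl
  by_cases hg : ∀ i ∈ linha, i = 1 ∨ i = 2
  · have hA := lcGo_good linha hg 0 esp []
    simp only [Nat.cast_zero] at hA
    have hB := lcLens_good linha hg 0
    simp only [List.replicate_zero, List.nil_append] at hB
    simp only [linha_completa, linha_completa_alt, hA, hmap, lcMap_good linha hg,
      Bool.false_eq_true, if_false]
    rw [show ((((linha.map lcChar).splitOn '1').filter (fun p => !p.isEmpty)).map
          (fun p => ((p.length : Int)))) = lcLens (linha.map lcChar) from rfl, hB]
    simp
  · have hb : ∃ i ∈ linha, i ≠ 1 ∧ i ≠ 2 := by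
      simp only [not_forall] at hg
      obtain ⟨i, hi, h⟩ := hg
      exact ⟨i, hi, fun e => h (Or.inl e), fun e => h (Or.inr e)⟩
    simp only [linha_completa, linha_completa_alt, lcGo_bad linha 0 esp [] hb, hmap,
      lcMap_bad linha hb, if_true]
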